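-- pv_equiv track=rewrite | github.com/roa5108/Algorithm | 프로그래머스/0/120815. 피자 나눠 먹기 （2）/피자 나눠 먹기 （2）.py | solution
-- ===== SOURCE A (Python) =====
-- def solution(n):
--     answer = 0
--     if n%6==0:
--         return n//6
--     else:
--         for i in range(1, n+1):
--             if 6*i%n==0:
--                 return i
-- ===== SOURCE B (Python) =====
-- def solution(n):
--     # gcd(6, n) by Euclid's algorithm, then divide: O(log n) instead of a linear scan.
--     a, b = 6, n
--     while b:
--         a, b = b, a % b
--     return n // a
-- ===== Notes on version B (the rewrite author's own statement) =====
-- stated objective: faster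
-- what changed: Replaces the linear scan over range(1, n+1) testing each candidate with an explicit Euclid gcd loop followed by a single exact division n // gcd(6, n).
-- outside the precondition, e.g. on solution(-5): A returns None, B returns 5; on solution(-6): A returns -1, B returns 1
import Mathlib
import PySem

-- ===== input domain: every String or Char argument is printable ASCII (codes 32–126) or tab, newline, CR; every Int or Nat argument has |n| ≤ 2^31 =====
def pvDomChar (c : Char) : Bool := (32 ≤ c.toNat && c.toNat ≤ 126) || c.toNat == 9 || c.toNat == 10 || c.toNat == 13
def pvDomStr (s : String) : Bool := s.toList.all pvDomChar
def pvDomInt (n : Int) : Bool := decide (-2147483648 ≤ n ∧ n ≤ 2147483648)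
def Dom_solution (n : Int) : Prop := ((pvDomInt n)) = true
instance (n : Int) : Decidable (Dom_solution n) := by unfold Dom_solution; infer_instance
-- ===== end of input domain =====

-- B replaces A's O(n) linear scan by an explicit Euclid gcd loop and one exact division (faster).

-- ===== PORT A =====
-- the for-loop over range(1, n+1): first i with 6*i % n == 0; [] = Python's fall-through
-- (returns None there, which is no Int; those inputs are excluded by Pre_solution)
def solutionLoop (n : Int) : List Int → Int
  | [] => 0
  | i :: rest => if PySem.Int.mod (6 * i) n == 0 then i else solutionLoop n rest

def solution (n : Int) : Int :=
  if PySem.Int.mod n 6 == 0 then PySem.Int.floordiv n 6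
  else solutionLoop n (PySem.List.pyRange 1 (n + 1) 1)

-- ===== PORT B =====
-- termination of the Euclid loop: |a % b| < |b| for b ≠ 0 (Python mod has the divisor's sign)
theorem pyMod_natAbs_lt (a b : Int) (hb : ¬ b = 0) : (PySem.Int.mod a b).natAbs < b.natAbs := by
  rcases lt_or_gt_of_ne hb with h | h
  · have h1 := PySem.Int.mod_neg_bounds a h
    omega
  · have h1 := PySem.Int.mod_nonneg a h
    have h2 := PySem.Int.mod_lt a h
    omega

-- while b: a, b = b, a % b
def euclid (a b : Int) : Int :=
  if hb : b = 0 then a else euclid b (PySem.Int.mod a b)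
termination_by b.natAbs
decreasing_by exact pyMod_natAbs_lt a b hb

def solution_alt (n : Int) : Int := PySem.Int.floordiv n (euclid 6 n)

-- ===== PRECONDITION & SPEC =====
-- Pre_ restricts to the task's natural domain n ≥ 0: on negative n A falls through its loop and
-- returns None (not an Int) except at negative multiples of 6, where a negative "pizza count"
-- is outside the problem's domain and neither value is specified.
def Pre_solution (n : Int) : Prop := 0 ≤ n
instance (n : Int) : Decidable (Pre_solution n) := by unfold Pre_solution; infer_instance
def pvWitness_solution : Int := 10

def Spec_solution (n : Int) (out : Int) : Prop := out = solution_alt n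
instance (n : Int) (out : Int) : Decidable (Spec_solution n out) := by unfold Spec_solution; infer_instance

-- ===== CLAIM (what is proved, stated in full; the proofs are below) =====
def Claim_equal_solution : Prop := ∀ (n : Int), Dom_solution n → Pre_solution n → Spec_solution n (solution n)

-- ===== LEMMAS AND PROOFS =====

-- gcd absorbs one Python-mod step (for a positive divisor)
theorem gcd_mod_step (a b : Int) (hb : 0 < b) :
    Int.gcd b (PySem.Int.mod a b) = Int.gcd a b := by
  rw [PySem.Int.mod_eq_emod_of_pos hb, Int.emod_def,
     show a - b * (a / b) = a + (-(a / b)) * b by ring,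
     Int.gcd_add_mul_right_right, Int.gcd_comm]

-- the Euclid loop computes gcd on nonnegative inputs
theorem euclid_eq_gcd (b a : Int) (ha : 0 ≤ a) (hb : 0 ≤ b) :
    euclid a b = (Int.gcd a b : Int) := by
  by_cases h0 : b = 0
  · subst h0
    rw [euclid]
    simp [Int.natAbs_of_nonneg ha]
  · have hbpos : 0 < b := lt_of_le_of_ne hb (Ne.symm h0)
    rw [euclid, dif_neg h0,
       euclid_eq_gcd (PySem.Int.mod a b) b hb (PySem.Int.mod_nonneg a hbpos),
       gcd_mod_step a b hbpos]
termination_by b.natAbs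
decreasing_by exact pyMod_natAbs_lt a b h0

-- the scan skips every element failing the test
theorem solutionLoop_skip (n : Int) (l1 l2 : List Int)
    (h : ∀ x ∈ l1, ¬ PySem.Int.mod (6 * x) n = 0) :
    solutionLoop n (l1 ++ l2) = solutionLoop n l2 := by
  induction l1 with
  | nil => rfl
  | cons i rest ih =>
      simp only [List.cons_append, solutionLoop]
      rw [if_neg (by simpa using h i (by simp)),
         ih (fun x hx => h x (by simp [hx]))]

-- characterisation of A's scan: it returns n / gcd(6, n) for n ≥ 1
theorem solutionLoop_eq (n : Int) (hn : 1 ≤ n) :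
    solutionLoop n (PySem.List.pyRange 1 (n + 1) 1) = n / (Int.gcd 6 n : Int) := by
  set g : Int := (Int.gcd 6 n : Int) with hg
  have hgnat : 0 < Int.gcd 6 n := by
    have : Int.gcd 6 n ≠ 0 := by simp [Int.gcd_eq_zero_iff]
    omega
  have hgpos : 0 < g := by rw [hg]; exact_mod_cast hgnat
  obtain ⟨m, hm⟩ : g ∣ n := hg ▸ Int.gcd_dvd_right 6 n
  obtain ⟨s, hs⟩ : g ∣ 6 := hg ▸ Int.gcd_dvd_left 6 n
  have hmdiv : n / g = m := by rw [hm]; exact Int.mul_ediv_cancel_left m (by omega)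
  have hsdiv : (6:ℤ) / g = s := by rw [hs]; exact Int.mul_ediv_cancel_left s (by omega)
  have hmpos : 0 < m := by nlinarith
  have hmn : m ≤ n := by nlinarith
  have hcop : Int.gcd m s = 1 := by
    have := Int.gcd_div_gcd_div_gcd (i := 6) (j := n) hgnat
    rw [← hg, hsdiv, hmdiv] at this
    rw [Int.gcd_comm]; exact this
  have key : ∀ x : Int, n ∣ 6 * x ↔ m ∣ x := by
    intro x
    constructor
    · intro hdvd
      have h1 : g * m ∣ g * (s * x) := by
        rw [← hm]; convert hdvd using 1; rw [hs]; ring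
      have h2 : m ∣ s * x := (mul_dvd_mul_iff_left (a := g) (by omega)).mp h1
      exact Int.dvd_of_dvd_mul_right_of_gcd_one h2 hcop
    · rintro ⟨k, rfl⟩
      exact ⟨s * k, by rw [hs, hm]; ring⟩
  rw [hmdiv]
  rw [PySem.List.pyRange_one_append 1 m (n + 1) (by omega) (by omega)]
  rw [solutionLoop_skip n _ _ ?_]
  · rw [PySem.List.pyRange_one_cons (by omega), solutionLoop,
       if_pos (by simp [PySem.Int.mod_eq_zero_iff_dvd, (key m).mpr dvd_rfl])]
  · intro x hx
    rw [PySem.List.mem_pyRange_one] at hx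
    rw [PySem.Int.mod_eq_zero_iff_dvd, key x]
    intro hdvd
    have := Int.le_of_dvd (by omega) hdvd
    omega

theorem solution_spec : Claim_equal_solution := by
  intro n _ hpre
  unfold Spec_solution solution solution_alt
  have hpre' : (0:ℤ) ≤ n := hpre
  rw [euclid_eq_gcd n 6 (by norm_num) hpre']
  by_cases h6 : PySem.Int.mod n 6 = 0
  · have hdvd : (6:ℤ) ∣ n := (PySem.Int.mod_eq_zero_iff_dvd n 6).mp h6
    rw [if_pos (by simpa using hdvd)]
    rw [Int.gcd_eq_natAbs_left hdvd]
    norm_num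
  · rw [if_neg (by simpa using h6)]
    have hn1 : 1 ≤ n := by
      rcases lt_or_eq_of_le hpre' with h | h
      · omega
      · exfalso; apply h6; rw [← h]; decide
    rw [solutionLoop_eq n hn1, PySem.Int.floordiv_eq_ediv_of_pos (by positivity)]
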